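-- pv_equiv track=rewrite | github.com/huytq000605/GrindLC | Interval/Count Ways to Group Overlapping Ranges/solution.py | countWays
-- ===== SOURCE A (Python) =====
-- from typing import List
--
-- def countWays(ranges: List[List[int]]) -> int:
--     ranges.sort()
--     groups = 0
--     last_end = -1
--     for s, e in ranges:
--         if s > last_end:
--             groups += 1
--         last_end = max(last_end, e)
--     return pow(2, groups, 10**9 + 7)
-- ===== SOURCE B (Python) =====
-- from typing import List
--
-- def countWays(ranges: List[List[int]]) -> int:
--     # A range opens a new group iff no range sorted before it reaches its start.
--     ranges.sort()
--     starts = [s for s, e in ranges]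
--     ends = [e for s, e in ranges]
--     groups = sum(1 for i, s in enumerate(starts) if all(e < s for e in ends[:i]))
--     return pow(2, groups, 10**9 + 7)
-- ===== Notes on version B (the rewrite author's own statement) =====
-- stated objective: alternative
-- what changed: Replaces A's single-pass (groups,last_end) accumulator scan by a direct per-range membership test: after the same in-place sort, a range is counted as opening a group iff every earlier range's end lies strictly below its start (a nested scan over the prefix), then 2^groups mod 10**9+7; equivalence is about the return value, both sort the argument in place.
-- intended difference: On inputs containing a range with negative start, A's last_end=-1 sentinel fails to count a group whose start is below 0, so A returns too small a power of 2 (e.g. 1 on [[-1,2]]); B counts every actual group of overlapping ranges (2 there), which is the intended component count. — e.g. on countWays([[-1, 2]]): A returns 1, B returns 2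
import Mathlib
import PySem

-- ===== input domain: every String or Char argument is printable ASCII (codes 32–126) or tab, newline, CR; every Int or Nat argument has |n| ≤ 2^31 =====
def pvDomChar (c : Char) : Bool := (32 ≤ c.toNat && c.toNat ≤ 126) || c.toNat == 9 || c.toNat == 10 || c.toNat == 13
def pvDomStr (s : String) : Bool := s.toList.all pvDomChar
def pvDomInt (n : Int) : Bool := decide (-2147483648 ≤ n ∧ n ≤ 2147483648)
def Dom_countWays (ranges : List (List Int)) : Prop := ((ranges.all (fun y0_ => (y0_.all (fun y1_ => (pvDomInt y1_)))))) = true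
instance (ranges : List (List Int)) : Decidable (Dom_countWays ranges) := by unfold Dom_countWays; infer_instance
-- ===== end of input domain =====

-- B replaces the (groups, last_end) accumulator scan by a per-range prefix test (nested scans);
-- both sort `ranges` in place (same mutation); equivalence is about the return value.

-- ===== PORT A =====
-- loop body of A: state (groups, last_end); `for s, e in ranges` reads r[0], r[1]
-- (r.headI / r.getD 1 0 — exact for the length-2 lists Pre_ admits; Python raises otherwise)
def countWaysStepA (st : Int × Int) (r : List Int) : Int × Int :=
  let s := r.headI
  let e := r.getD 1 0
  ((if s > st.2 then st.1 + 1 else st.1), max st.2 e)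

def countWays (ranges : List (List Int)) : Int :=
  let rs := PySem.List.sorted ranges (fun r => r) false   -- ranges.sort(): Python lex order on lists
  let st := rs.foldl countWaysStepA (0, -1)
  PySem.Int.powMod 2 st.1.toNat (10 ^ 9 + 7)              -- pow(2, groups, 10**9+7); groups ≥ 0

-- ===== PORT B =====
def countWays_alt (ranges : List (List Int)) : Int :=
  let rs := PySem.List.sorted ranges (fun r => r) false   -- ranges.sort()
  let starts := rs.map (fun r => r.headI)                 -- [s for s, e in ranges]
  let ends := rs.map (fun r => r.getD 1 0)                -- [e for s, e in ranges]
  -- sum(1 for i, s in enumerate(starts) if all(e < s for e in ends[:i]))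
  let groups : Int :=
    ((PySem.List.enumerate starts 0).countP
      (fun p => (PySem.List.slice ends none (some p.1)).all (fun e => e < p.2)) : Nat)
  PySem.Int.powMod 2 groups.toNat (10 ^ 9 + 7)            -- pow(2, groups, 10**9+7)

-- ===== PRECONDITION & SPEC =====
-- Pre_ admits exactly the inputs where Python returns: every range must be a 2-element
-- [start, end] pair (the unpackings `for s, e in …` raise ValueError otherwise).
def Pre_countWays (ranges : List (List Int)) : Prop :=
  ∀ r ∈ ranges, r.length = 2
instance (ranges : List (List Int)) : Decidable (Pre_countWays ranges) := by unfold Pre_countWays; infer_instance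

def pvWitness_countWays : List (List Int) := [[1, 5], [3, 7], [9, 12]]

-- On inputs containing a range with negative start, A's last_end = -1 sentinel fails to count a
-- group whose start is below 0, so A returns too small a power of 2; B counts every actual group
-- of overlapping ranges, the intended component count.
def D_countWays (ranges : List (List Int)) : Prop :=
  ∃ r ∈ ranges, r.headI < 0
instance (ranges : List (List Int)) : Decidable (D_countWays ranges) := by unfold D_countWays; infer_instance

def Spec_countWays (ranges : List (List Int)) (out : Int) : Prop :=
  ¬ D_countWays ranges → out = countWays_alt ranges
instance (ranges : List (List Int)) (out : Int) : Decidable (Spec_countWays ranges out) := by unfold Spec_countWays; infer_instance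

def pvDiffWitness_countWays : List (List Int) := [[-1, 2]]
def pvDiffWitnessOut_countWays : Int × Int := (1, 2)

-- ===== CLAIM (what is proved, stated in full; the proofs are below) =====
def Claim_unchanged_countWays : Prop := ∀ (ranges : List (List Int)), Dom_countWays ranges → Pre_countWays ranges → Spec_countWays ranges (countWays ranges)
def Claim_changed_countWays : Prop := Dom_countWays (pvDiffWitness_countWays) ∧ Pre_countWays (pvDiffWitness_countWays) ∧ D_countWays (pvDiffWitness_countWays) ∧ countWays (pvDiffWitness_countWays) = pvDiffWitnessOut_countWays.1 ∧ countWays_alt (pvDiffWitness_countWays) = pvDiffWitnessOut_countWays.2 ∧ pvDiffWitnessOut_countWays.1 ≠ pvDiffWitnessOut_countWays.2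

-- ===== LEMMAS AND PROOFS =====

-- running max starting at a: strictly below s iff a and every element are
theorem pv_foldl_max_lt (l : List Int) : ∀ (a s : Int),
    (l.foldl max a < s ↔ (a < s ∧ ∀ e ∈ l, e < s)) := by
  induction l with
  | nil => intro a s; simp
  | cons x t ih =>
    intro a s
    simp only [List.foldl_cons, ih (max a x) s, List.mem_cons]
    constructor
    · rintro ⟨h1, h2⟩
      exact ⟨by omega, fun e he => he.elim (fun h => by omega) (h2 e)⟩
    · rintro ⟨h1, h2⟩
      exact ⟨by have := h2 x (Or.inl rfl); omega, fun e he => h2 e (Or.inr he)⟩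

-- the invariant of A's fold, against B's counting expression, by appending on the right
theorem pv_main (rs : List (List Int)) (h : ∀ r ∈ rs, 0 ≤ r.headI) :
    (rs.foldl countWaysStepA (0, -1)).1
      = (((PySem.List.enumerate (rs.map (fun r => r.headI)) 0).countP
          (fun p => (PySem.List.slice (rs.map (fun r => r.getD 1 0)) none (some p.1)).all
            (fun e => e < p.2)) : Nat) : Int)
    ∧ (rs.foldl countWaysStepA (0, -1)).2
      = (rs.map (fun r => r.getD 1 0)).foldl max (-1) := by
  induction rs using List.reverseRecOn with
  | nil => simp
  | append_singleton t r ih =>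
    have ht : ∀ x ∈ t, 0 ≤ x.headI := fun x hx => h x (by simp [hx])
    obtain ⟨ih1, ih2⟩ := ih ht
    have hr : 0 ≤ r.headI := h r (by simp)
    constructor
    · rw [List.foldl_append]
      simp only [List.foldl_cons, List.foldl_nil, countWaysStepA]
      rw [List.map_append, List.map_append, PySem.List.enumerate_append,
        List.countP_append]
      have hlen : (t.map (fun r => r.headI)).length = t.length := by simp
      -- the old entries: slicing the extended ends list below index t.length is unchanged
      have hcongr :
          (PySem.List.enumerate (t.map (fun r => r.headI)) 0).countP
            (fun p => (PySem.List.slice (t.map (fun r => r.getD 1 0) ++ [r].map (fun r => r.getD 1 0)) none (some p.1)).all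
              (fun e => e < p.2))
          = (PySem.List.enumerate (t.map (fun r => r.headI)) 0).countP
            (fun p => (PySem.List.slice (t.map (fun r => r.getD 1 0)) none (some p.1)).all
              (fun e => e < p.2)) := by
        apply List.countP_congr
        intro p hp
        rw [PySem.List.mem_enumerate_iff] at hp
        obtain ⟨k, hk, rfl⟩ := hp
        simp only [Int.zero_add]
        rw [PySem.List.slice_to_natCast, PySem.List.slice_to_natCast,
          List.take_append_of_le_length (by simp at hk ⊢; omega)]
      rw [hcongr, ih1]
      -- the new entry (index t.length): its slice is the full old ends list
      have hlast :
          (PySem.List.enumerate ([r].map (fun r => r.headI)) (0 + (t.map (fun r => r.headI)).length)).countP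
            (fun p => (PySem.List.slice (t.map (fun r => r.getD 1 0) ++ [r].map (fun r => r.getD 1 0)) none (some p.1)).all
              (fun e => e < p.2))
          = if (t.map (fun r => r.getD 1 0)).all (fun e => e < r.headI) then 1 else 0 := by
        simp only [List.map_cons, List.map_nil, PySem.List.enumerate_cons,
          PySem.List.enumerate_nil, List.countP_cons, List.countP_nil, hlen, Int.zero_add]
        have : ((t.length : Int)) = ((t.map (fun r => r.getD 1 0)).length : Int) := by simp
        rw [this, PySem.List.slice_to_natCast, List.take_left]
        simp
      rw [hlast, ih2]
      have hiff : (r.headI > (t.map (fun r => r.getD 1 0)).foldl max (-1))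
          ↔ ((t.map (fun r => r.getD 1 0)).all (fun e => e < r.headI) = true) := by
        rw [show (r.headI > (t.map (fun r => r.getD 1 0)).foldl max (-1))
            ↔ ((t.map (fun r => r.getD 1 0)).foldl max (-1) < r.headI) from Iff.rfl,
          pv_foldl_max_lt, List.all_eq_true]
        constructor
        · rintro ⟨_, h2⟩ e he; exact decide_eq_true (h2 e he)
        · intro h2; exact ⟨by omega, fun e he => of_decide_eq_true (h2 e he)⟩
      by_cases hc : (t.map (fun r => r.getD 1 0)).all (fun e => e < r.headI) = true
      · rw [if_pos (hiff.mpr hc), if_pos hc]; push_cast; omega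
      · rw [if_neg (fun hgt => hc (hiff.mp hgt)), if_neg hc]; simp
    · rw [List.foldl_append]
      simp only [List.foldl_cons, List.foldl_nil, countWaysStepA, ih2]
      rw [List.map_append, List.foldl_append]
      rfl

-- ===== VERDICT (by name: the statements are the Claim_ definitions above) =====
theorem countWays_spec : Claim_unchanged_countWays := by
  intro ranges _ _
  unfold Spec_countWays
  intro hnD
  have hpos : ∀ r ∈ PySem.List.sorted ranges (fun r => r) false, 0 ≤ r.headI := by
    intro r hr
    have hm : r ∈ ranges := (PySem.List.mem_sorted ranges (fun r => r) false r).mp hr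
    by_contra hneg
    exact hnD ⟨r, hm, by omega⟩
  obtain ⟨h1, _⟩ := pv_main (PySem.List.sorted ranges (fun r => r) false) hpos
  unfold countWays countWays_alt
  simp only []
  rw [h1]

theorem countWays_changed : Claim_changed_countWays := by
  unfold Claim_changed_countWays; decide
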